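-- pv_equiv track=rewrite | github.com/abhigandesri13/TCS-codevita-season-13 | TCS Round 1/sixth.py | find_candidate_triples
-- ===== SOURCE A (Python) =====
-- def find_candidate_triples(area):
--     triples = set()
--     # iterate A,B,C from 1..area
--     # We can enumerate factors: but brute small
--     for A in range(1, area+1):
--         for B in range(1, area+1):
--             for C in range(1, area+1):
--                 if 2*(A*B + A*C + B*C) == area:
--                     triples.add(tuple(sorted((A,B,C))))
--     return sorted(triples)
-- ===== SOURCE B (Python) =====
-- def find_candidate_triples(area):
--     out = []
--     for a in range(1, area + 1):
--         for b in range(a, area + 1):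
--             q, r = divmod(area - 2 * a * b, 2 * (a + b))
--             if r == 0 and q >= b:
--                 out.append((a, b, q))
--     return out
-- ===== Notes on version B (the rewrite author's own statement) =====
-- stated objective: faster
-- what changed: Replaces A's cubic brute-force scan over all (A,B,C) plus set-dedup-and-sort by a quadratic scan over ordered pairs a<=b that solves the triple equation for c with one divmod, emitting results already deduplicated and in sorted order.
import Mathlib
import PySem

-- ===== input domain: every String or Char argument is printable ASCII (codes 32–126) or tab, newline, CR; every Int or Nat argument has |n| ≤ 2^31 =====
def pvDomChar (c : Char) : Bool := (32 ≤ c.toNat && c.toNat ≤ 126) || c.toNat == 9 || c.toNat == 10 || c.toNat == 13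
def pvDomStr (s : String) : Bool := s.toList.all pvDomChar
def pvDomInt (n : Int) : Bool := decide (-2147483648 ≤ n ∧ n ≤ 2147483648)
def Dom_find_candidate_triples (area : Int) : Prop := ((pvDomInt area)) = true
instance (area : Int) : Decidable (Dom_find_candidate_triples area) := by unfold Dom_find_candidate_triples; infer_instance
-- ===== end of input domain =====

-- B replaces A's cubic scan over (A,B,C) by a quadratic scan over ordered pairs a ≤ b that
-- solves the triple equation for c by one floor-division (objective: faster, asymptotic).

-- ===== PORT A =====
def find_candidate_triples (area : Int) : List (List Int) :=
  let triples : PySem.Set (List Int) :=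
    (PySem.List.pyRange 1 (area + 1) 1).foldl (fun s A =>
      (PySem.List.pyRange 1 (area + 1) 1).foldl (fun s B =>
        (PySem.List.pyRange 1 (area + 1) 1).foldl (fun s C =>
          if 2 * (A * B + A * C + B * C) = area then
            PySem.Set.add s (PySem.List.sorted [A, B, C] (fun x => x))
          else s) s) s)
      PySem.Set.empty
  PySem.List.sorted triples (fun x => x)

-- ===== PORT B =====
def find_candidate_triples_alt (area : Int) : List (List Int) :=
  (PySem.List.pyRange 1 (area + 1) 1).foldl (fun out a =>
    (PySem.List.pyRange a (area + 1) 1).foldl (fun out b =>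
      let q := PySem.Int.floordiv (area - 2 * a * b) (2 * (a + b))
      let r := PySem.Int.mod (area - 2 * a * b) (2 * (a + b))
      if r = 0 ∧ b ≤ q then out ++ [[a, b, q]] else out) out) []

-- ===== PRECONDITION & SPEC =====
def Spec_find_candidate_triples (area : Int) (out : List (List Int)) : Prop := out = find_candidate_triples_alt area
instance (area : Int) (out : List (List Int)) : Decidable (Spec_find_candidate_triples area out) := by unfold Spec_find_candidate_triples; infer_instance

-- ===== CLAIM (what is proved, stated in full; the proofs are below) =====
def Claim_equal_find_candidate_triples : Prop := ∀ (area : Int), Dom_find_candidate_triples area → Spec_find_candidate_triples area (find_candidate_triples area)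

-- ===== LEMMAS AND PROOFS =====

-- membership in a foldl that only ever adds elements with property Q
theorem pv_foldl_mem_iff {α β : Type} (g : List α → β → List α) (Q : β → α → Prop)
    (hg : ∀ s x t, t ∈ g s x ↔ t ∈ s ∨ Q x t) :
    ∀ (xs : List β) (s : List α) (t : α), t ∈ xs.foldl g s ↔ t ∈ s ∨ ∃ x ∈ xs, Q x t := by
  intro xs
  induction xs with
  | nil => simp
  | cons x xs ih =>
    intro s t
    rw [List.foldl_cons, ih, hg]
    simp only [List.mem_cons]
    constructor
    · rintro ((h | h) | ⟨y, hy, hQ⟩)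
      exacts [Or.inl h, Or.inr ⟨x, Or.inl rfl, h⟩, Or.inr ⟨y, Or.inr hy, hQ⟩]
    · rintro (h | ⟨y, (rfl | hy), hQ⟩)
      exacts [Or.inl (Or.inl h), Or.inl (Or.inr hQ), Or.inr ⟨y, hy, hQ⟩]

theorem pv_foldl_nodup {α β : Type} (g : List α → β → List α)
    (hg : ∀ s x, s.Nodup → (g s x).Nodup) :
    ∀ (xs : List β) (s : List α), s.Nodup → (xs.foldl g s).Nodup := by
  intro xs
  induction xs with
  | nil => intro s hs; simpa using hs
  | cons x xs ih => intro s hs; exact ih _ (hg _ _ hs)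

-- python's sorted of a 3-element list: an ordered rearrangement, with the symmetric sum preserved
theorem pv_sorted3 (A B C : Int) : ∃ a b c : Int, a ≤ b ∧ b ≤ c ∧
    [a, b, c].Perm [A, B, C] ∧ a * b + a * c + b * c = A * B + A * C + B * C ∧
    PySem.List.sorted [A, B, C] (fun x => x) = [a, b, c] := by
  have sw01 : ∀ x y z : Int, [y, x, z].Perm [x, y, z] := fun x y z => List.Perm.swap x y [z]
  have sw12 : ∀ x y z : Int, [x, z, y].Perm [x, y, z] := fun x y z =>
    List.Perm.cons x (List.Perm.swap y z [])
  have key : ∀ a b c : Int, a ≤ b → b ≤ c → [a,b,c].Perm [A,B,C] →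
      PySem.List.sorted [A, B, C] (fun x => x) = [a, b, c] := by
    intro a b c h1 h2 hp
    refine PySem.List.sorted_id_eq_of_perm_of_pairwise _ _ hp ?_
    refine List.pairwise_cons.mpr ⟨?_, List.pairwise_cons.mpr ⟨?_, List.pairwise_singleton _ _⟩⟩
    · intro y hy; simp at hy; rcases hy with h | h <;> omega
    · intro y hy; simp at hy; omega
  rcases le_total A B with hab | hab <;> rcases le_total B C with hbc | hbc <;>
    rcases le_total A C with hac | hac
  · exact ⟨A, B, C, hab, hbc, List.Perm.refl _, by ring, key _ _ _ hab hbc (List.Perm.refl _)⟩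
  · exact ⟨A, B, C, hab, hbc, List.Perm.refl _, by ring, key _ _ _ hab hbc (List.Perm.refl _)⟩
  · exact ⟨A, C, B, hac, by omega, sw12 A B C, by ring, key _ _ _ hac (by omega) (sw12 A B C)⟩
  · exact ⟨C, A, B, by omega, hab, (sw01 A C B).trans (sw12 A B C),
      by ring, key _ _ _ (by omega) hab ((sw01 A C B).trans (sw12 A B C))⟩
  · exact ⟨B, A, C, hab, hac, sw01 A B C, by ring, key _ _ _ hab hac (sw01 A B C)⟩
  · exact ⟨B, C, A, hbc, by omega, (sw12 B A C).trans (sw01 A B C),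
      by ring, key _ _ _ hbc (by omega) ((sw12 B A C).trans (sw01 A B C))⟩
  · exact ⟨B, A, C, hab, hac, sw01 A B C, by ring, key _ _ _ hab hac (sw01 A B C)⟩
  · exact ⟨C, B, A, hbc, hab, (sw01 B C A).trans ((sw12 B A C).trans (sw01 A B C)),
      by ring, key _ _ _ hbc hab ((sw01 B C A).trans ((sw12 B A C).trans (sw01 A B C)))⟩

-- the solution predicate both programs enumerate
def pvSol (area : Int) (t : List Int) : Prop :=
  ∃ a b c : Int, 1 ≤ a ∧ a ≤ b ∧ b ≤ c ∧ c ≤ area ∧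
    2 * (a * b + a * c + b * c) = area ∧ t = [a, b, c]

-- A's inner set: membership
theorem pv_setA_mem (area : Int) (t : List Int) :
    t ∈ ((PySem.List.pyRange 1 (area + 1) 1).foldl (fun s A =>
      (PySem.List.pyRange 1 (area + 1) 1).foldl (fun s B =>
        (PySem.List.pyRange 1 (area + 1) 1).foldl (fun s C =>
          if 2 * (A * B + A * C + B * C) = area then
            PySem.Set.add s (PySem.List.sorted [A, B, C] (fun x => x))
          else s) s) s)
      PySem.Set.empty) ↔ pvSol area t := by
  rw [pv_foldl_mem_iff _ (fun A t => ∃ B ∈ PySem.List.pyRange 1 (area+1) 1,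
        ∃ C ∈ PySem.List.pyRange 1 (area+1) 1, 2 * (A * B + A * C + B * C) = area ∧
          t = PySem.List.sorted [A, B, C] (fun x => x)) ?memA]
  case memA =>
    intro s A t
    rw [pv_foldl_mem_iff _ (fun B t => ∃ C ∈ PySem.List.pyRange 1 (area+1) 1,
          2 * (A * B + A * C + B * C) = area ∧
            t = PySem.List.sorted [A, B, C] (fun x => x)) ?memB]
    case memB =>
      intro s B t
      rw [pv_foldl_mem_iff _ (fun C t => 2 * (A * B + A * C + B * C) = area ∧
            t = PySem.List.sorted [A, B, C] (fun x => x)) ?memC]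
      case memC =>
        intro s C t
        split_ifs with h
        · rw [PySem.Set.mem_add]; tauto
        · tauto
  simp only [PySem.Set.empty, List.not_mem_nil, false_or]
  constructor
  · rintro ⟨A, hA, B, hB, C, hC, heq, rfl⟩
    simp only [PySem.List.mem_pyRange_one] at hA hB hC
    obtain ⟨a, b, c, h1, h2, hp, hs, hsort⟩ := pv_sorted3 A B C
    have ha : a ∈ [A, B, C] := hp.subset (by simp)
    have hc : c ∈ [A, B, C] := hp.subset (by simp)
    simp only [List.mem_cons, List.not_mem_nil, or_false] at ha hc
    refine ⟨a, b, c, ?_, h1, h2, ?_, by linarith, hsort⟩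
    · rcases ha with h | h | h <;> omega
    · rcases hc with h | h | h <;> omega
  · rintro ⟨a, b, c, h1, h2, h3, h4, heq, rfl⟩
    refine ⟨a, PySem.List.mem_pyRange_one.mpr (by omega),
      b, PySem.List.mem_pyRange_one.mpr (by omega),
      c, PySem.List.mem_pyRange_one.mpr (by omega), heq, ?_⟩
    refine (PySem.List.sorted_eq_self_of_pairwise _ _ ?_).symm
    refine List.pairwise_cons.mpr ⟨?_, List.pairwise_cons.mpr ⟨?_, List.pairwise_singleton _ _⟩⟩
    · intro y hy; simp at hy; rcases hy with h | h <;> omega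
    · intro y hy; simp at hy; omega

-- A's inner set: no duplicates
theorem pv_setA_nodup (area : Int) :
    ((PySem.List.pyRange 1 (area + 1) 1).foldl (fun s A =>
      (PySem.List.pyRange 1 (area + 1) 1).foldl (fun s B =>
        (PySem.List.pyRange 1 (area + 1) 1).foldl (fun s C =>
          if 2 * (A * B + A * C + B * C) = area then
            PySem.Set.add s (PySem.List.sorted [A, B, C] (fun x => x))
          else s) s) s)
      PySem.Set.empty).Nodup := by
  refine pv_foldl_nodup _ ?_ _ _ (by simp [PySem.Set.empty])
  intro s A hs
  refine pv_foldl_nodup _ ?_ _ _ hs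
  intro s B hs
  refine pv_foldl_nodup _ ?_ _ _ hs
  intro s C hs
  split_ifs with h
  · exact PySem.Set.nodup_add _ _ hs
  · exact hs

-- B's loop body as filter/map, whole loop as flatMap
theorem pv_B_flatMap (area : Int) :
    find_candidate_triples_alt area =
      (PySem.List.pyRange 1 (area + 1) 1).flatMap (fun a =>
        ((PySem.List.pyRange a (area + 1) 1).filter (fun b =>
            decide (PySem.Int.mod (area - 2 * a * b) (2 * (a + b)) = 0 ∧
              b ≤ PySem.Int.floordiv (area - 2 * a * b) (2 * (a + b))))).map (fun b =>
          [a, b, PySem.Int.floordiv (area - 2 * a * b) (2 * (a + b))])) := by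
  unfold find_candidate_triples_alt
  have hinner : ∀ (a : Int) (out : List (List Int)),
      (PySem.List.pyRange a (area + 1) 1).foldl (fun out b =>
        let q := PySem.Int.floordiv (area - 2 * a * b) (2 * (a + b))
        let r := PySem.Int.mod (area - 2 * a * b) (2 * (a + b))
        if r = 0 ∧ b ≤ q then out ++ [[a, b, q]] else out) out =
      out ++ ((PySem.List.pyRange a (area + 1) 1).filter (fun b =>
          decide (PySem.Int.mod (area - 2 * a * b) (2 * (a + b)) = 0 ∧
            b ≤ PySem.Int.floordiv (area - 2 * a * b) (2 * (a + b))))).map (fun b =>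
        [a, b, PySem.Int.floordiv (area - 2 * a * b) (2 * (a + b))]) := by
    intro a out
    have := PySem.List.foldl_append_if
      (fun b => decide (PySem.Int.mod (area - 2 * a * b) (2 * (a + b)) = 0 ∧
          b ≤ PySem.Int.floordiv (area - 2 * a * b) (2 * (a + b))))
      (fun b => [a, b, PySem.Int.floordiv (area - 2 * a * b) (2 * (a + b))])
      (PySem.List.pyRange a (area + 1) 1) out
    simp only [decide_eq_true_eq] at this
    simpa using this
  calc (PySem.List.pyRange 1 (area + 1) 1).foldl (fun out a =>
        (PySem.List.pyRange a (area + 1) 1).foldl (fun out b =>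
          let q := PySem.Int.floordiv (area - 2 * a * b) (2 * (a + b))
          let r := PySem.Int.mod (area - 2 * a * b) (2 * (a + b))
          if r = 0 ∧ b ≤ q then out ++ [[a, b, q]] else out) out) []
      = (PySem.List.pyRange 1 (area + 1) 1).foldl (fun out a => out ++
          ((PySem.List.pyRange a (area + 1) 1).filter (fun b =>
              decide (PySem.Int.mod (area - 2 * a * b) (2 * (a + b)) = 0 ∧
                b ≤ PySem.Int.floordiv (area - 2 * a * b) (2 * (a + b))))).map (fun b =>
            [a, b, PySem.Int.floordiv (area - 2 * a * b) (2 * (a + b))])) [] := by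
        exact List.foldl_ext _ _ _ (fun out a _ => hinner a out)
    _ = _ := by
        rw [PySem.List.foldl_append_eq_flatMap]
        simp

-- B's test on an ordered pair (a,b) is exactly "some c ≥ b completes the triple"
theorem pv_cond_iff (area a b : Int) (ha : 1 ≤ a) (hab : a ≤ b) (t : List Int) :
    (PySem.Int.mod (area - 2 * a * b) (2 * (a + b)) = 0 ∧
        b ≤ PySem.Int.floordiv (area - 2 * a * b) (2 * (a + b)) ∧
        t = [a, b, PySem.Int.floordiv (area - 2 * a * b) (2 * (a + b))]) ↔
      ∃ c : Int, b ≤ c ∧ 2 * (a * b + a * c + b * c) = area ∧ t = [a, b, c] := by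
  have hd : (0 : Int) < 2 * (a + b) := by omega
  constructor
  · rintro ⟨hr, hq, rfl⟩
    have h := PySem.Int.floordiv_mul_add_mod (area - 2 * a * b) (2 * (a + b))
    rw [hr, add_zero] at h
    exact ⟨PySem.Int.floordiv (area - 2 * a * b) (2 * (a + b)), hq,
      by linear_combination h, rfl⟩
  · rintro ⟨c, hbc, heq, rfl⟩
    have hc : c * (2 * (a + b)) = area - 2 * a * b := by linear_combination heq
    have hq : PySem.Int.floordiv (area - 2 * a * b) (2 * (a + b)) = c := by
      rw [PySem.Int.floordiv_eq_iff_of_pos hd]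
      constructor
      · omega
      · nlinarith
    refine ⟨?_, by omega, by rw [hq]⟩
    rw [PySem.Int.mod_eq_zero_iff_dvd]
    exact ⟨c, by linear_combination -hc⟩

-- membership in B's output
theorem pv_B_mem (area : Int) (t : List Int) :
    t ∈ find_candidate_triples_alt area ↔ pvSol area t := by
  rw [pv_B_flatMap]
  simp only [List.mem_flatMap, List.mem_map, List.mem_filter,
    PySem.List.mem_pyRange_one, decide_eq_true_eq]
  constructor
  · rintro ⟨a, ⟨ha1, ha2⟩, b, ⟨⟨hb1, hb2⟩, hr, hq⟩, rfl⟩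
    obtain ⟨c, hbc, heq, ht⟩ := (pv_cond_iff area a b ha1 hb1 _).mp ⟨hr, hq, rfl⟩
    have h1 : (1 : Int) * 1 ≤ a * b := mul_le_mul ha1 (by omega) (by omega) (by omega)
    have h2 : c ≤ a * c := le_mul_of_one_le_left (by omega) ha1
    have h3 : c ≤ b * c := le_mul_of_one_le_left (by omega) (by omega)
    exact ⟨a, b, c, ha1, hb1, hbc, by linarith, heq, ht⟩
  · rintro ⟨a, b, c, h1, h2, h3, h4, heq, rfl⟩
    obtain ⟨hr, hq, ht⟩ := (pv_cond_iff area a b h1 h2 [a, b, c]).mpr ⟨c, h3, heq, rfl⟩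
    exact ⟨a, ⟨h1, by omega⟩, b, ⟨⟨⟨h2, by omega⟩, hr, hq⟩, ht.symm⟩⟩

-- B's output is strictly increasing in lexicographic order
theorem pv_B_pairwise (area : Int) :
    (find_candidate_triples_alt area).Pairwise (fun s t => s < t) := by
  rw [pv_B_flatMap]
  rw [List.pairwise_flatMap]
  constructor
  · intro a _
    rw [List.pairwise_map]
    refine List.Pairwise.imp ?_ ((PySem.List.pairwise_lt_pyRange_one a (area + 1)).filter _)
    intro b b' hlt
    rw [List.cons_lt_cons_iff]
    right
    exact ⟨rfl, by rw [List.cons_lt_cons_iff]; left; exact hlt⟩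
  · refine List.Pairwise.imp ?_ (PySem.List.pairwise_lt_pyRange_one 1 (area + 1))
    intro a a' hlt t ht t' ht'
    simp only [List.mem_map] at ht ht'
    obtain ⟨b, _, rfl⟩ := ht
    obtain ⟨b', _, rfl⟩ := ht'
    rw [List.cons_lt_cons_iff]
    left
    exact hlt

-- the port's `sorted` elaborated with core's lex `LT (List Int)`; the order lemmas use the
-- (definitionally equal) Mathlib `LinearOrder (List Int)` instances — bridge the Decidable instances
theorem pv_sorted_inst (xs : List (List Int)) :
    @PySem.List.sorted (List Int) (List Int) List.instLT (fun a b => a.decidableLT b) xs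
        (fun x => x) false =
      @PySem.List.sorted (List Int) (List Int) List.instLinearOrder.toLT
        (@LinearOrder.toDecidableLT _ List.instLinearOrder) xs (fun x => x) false := by
  have h : (fun (a b : List Int) => a.decidableLT b) =
      (@LinearOrder.toDecidableLT _ List.instLinearOrder) := by
    funext a b
    exact Subsingleton.elim _ _
  rw [h]

-- ===== VERDICT (by name: the statement is the Claim_ definition above) =====
theorem find_candidate_triples_spec : Claim_equal_find_candidate_triples := by
  intro area _
  unfold Spec_find_candidate_triples
  unfold find_candidate_triples
  dsimp only
  rw [pv_sorted_inst]
  refine PySem.List.sorted_eq_of_perm_of_pairwise_lt _ _ (fun x : List Int => x) ?_ ?_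
  · rw [List.perm_ext_iff_of_nodup ?_ (pv_setA_nodup area)]
    · intro t
      rw [pv_B_mem, pv_setA_mem]
    · exact (pv_B_pairwise area).nodup
  · exact pv_B_pairwise area
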